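-- pv_equiv track=rewrite | github.com/amit-jaisinghani/PythonAssignments | hashmap.py | hash_func_unique_ascii
-- ===== SOURCE A (Python) =====
-- def hash_func_unique_ascii(key):
--     '''
--     calculates hash value based on every unique ascii value in the word.
--     :param key: Key to store
--     :return: Hash value for that key
--     '''
--
--     list_characters = []
--     list_value = []
--     for ch in key:
--         try:
--             index = list_characters.index(ch)
--             list_value[index] += 1
--         except ValueError:
--             list_characters.append(ch)
--             list_value.append(ord(ch))
--
--     value = 0
--     for ascii_frequency_value in list_value:
--         value += ascii_frequency_value
--
--     return value
-- ===== SOURCE B (Python) =====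
-- def hash_func_unique_ascii(key):
--     seen = set(key)
--     return sum(ord(c) for c in seen) + (len(key) - len(seen))
-- ===== Notes on version B (the rewrite author's own statement) =====
-- stated objective: simpler
-- what changed: Replaces the per-character frequency table built with repeated list.index scans by a closed form: sum of ords of the distinct characters plus (length minus number of distinct characters), since each repeat contributes exactly 1.
import Mathlib
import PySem

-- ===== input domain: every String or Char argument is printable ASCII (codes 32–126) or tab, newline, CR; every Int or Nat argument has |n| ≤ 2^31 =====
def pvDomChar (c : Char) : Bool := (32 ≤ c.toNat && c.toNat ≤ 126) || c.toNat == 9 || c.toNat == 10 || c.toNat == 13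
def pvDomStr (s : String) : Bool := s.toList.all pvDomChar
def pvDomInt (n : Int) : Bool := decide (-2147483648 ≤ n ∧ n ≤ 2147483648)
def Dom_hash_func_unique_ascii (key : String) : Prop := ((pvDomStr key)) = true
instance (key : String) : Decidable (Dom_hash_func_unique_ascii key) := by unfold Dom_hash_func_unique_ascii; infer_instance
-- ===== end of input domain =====

-- B replaces A's list.index-based frequency table by a closed form over the set of
-- distinct characters (sum of ords of distinct chars + repeats = length - distinct count); objective: simpler.


-- ===== PORT A =====
-- the body of A's first loop: try index/ increment except ValueError: append
def pvStepA (st : List Char × List Int) (ch : Char) : List Char × List Int :=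
  match PySem.List.index? st.1 ch with
  | some index => (st.1, st.2.set index (st.2.getD index 0 + 1))
  | none => (st.1 ++ [ch], st.2 ++ [(ch.toNat : Int)])

def hash_func_unique_ascii (key : String) : Int :=
  let st := key.toList.foldl pvStepA ([], [])
  st.2.foldl (fun value ascii_frequency_value => value + ascii_frequency_value) 0

-- ===== PORT B =====
def hash_func_unique_ascii_alt (key : String) : Int :=
  let seen : PySem.Set Char := PySem.Set.ofList key.toList
  (seen.map (fun c => (c.toNat : Int))).sum + ((key.toList.length : Int) - PySem.Set.len seen)

-- ===== PRECONDITION & SPEC =====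
def Spec_hash_func_unique_ascii (key : String) (out : Int) : Prop := out = hash_func_unique_ascii_alt key
instance (key : String) (out : Int) : Decidable (Spec_hash_func_unique_ascii key out) := by unfold Spec_hash_func_unique_ascii; infer_instance

-- ===== CLAIM (what is proved, stated in full; the proofs are below) =====
def Claim_equal_hash_func_unique_ascii : Prop := ∀ (key : String), Dom_hash_func_unique_ascii key → Spec_hash_func_unique_ascii key (hash_func_unique_ascii key)

-- ===== LEMMAS AND PROOFS =====

-- sum of a list after incrementing one in-range entry
lemma pv_sum_set_add_one (vs : List Int) (i : Nat) (h : i < vs.length) :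
    (vs.set i (vs.getD i 0 + 1)).sum = vs.sum + 1 := by
  induction vs generalizing i with
  | nil => simp at h
  | cons v vs ih =>
    cases i with
    | zero => simp [List.set]; ring
    | succ j =>
      simp only [List.set, List.getD, List.getElem?_cons_succ, List.sum_cons]
      rw [show vs[j]?.getD 0 = vs.getD j 0 from rfl, ih j (by simpa using h)]
      ring

-- main loop invariant for A's first loop
lemma pv_loopA (l : List Char) (cs : List Char) (vs : List Int) (h : cs.length = vs.length) :
    (l.foldl pvStepA (cs, vs)).1 = PySem.Set.update cs l ∧
    (l.foldl pvStepA (cs, vs)).1.length = (l.foldl pvStepA (cs, vs)).2.length ∧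
    (l.foldl pvStepA (cs, vs)).2.sum + ((cs.map (fun c => (c.toNat : Int))).sum)
        + ((l.foldl pvStepA (cs, vs)).1.length : Int)
      = (((l.foldl pvStepA (cs, vs)).1.map (fun c => (c.toNat : Int))).sum) + vs.sum
        + (l.length : Int) + (cs.length : Int) := by
  induction l generalizing cs vs with
  | nil => refine ⟨by simp [PySem.Set.update], h ▸ rfl, by simp only [List.foldl_nil, List.length_nil, Nat.cast_zero, h]; ring⟩
  | cons ch l ih =>
    simp only [List.foldl_cons]
    by_cases hm : ch ∈ cs
    · have hidx : (PySem.List.index? cs ch).isSome := (PySem.List.index?_isSome_iff cs ch).mpr hm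
      obtain ⟨i, hi⟩ := Option.isSome_iff_exists.mp hidx
      have hilt : i < cs.length := by
        obtain ⟨hk, -, -⟩ := PySem.List.getElem_of_index?_eq_some hi
        exact hk
      have hi' : List.idxOf? ch cs = some i := by
        rw [← PySem.List.index?_eq_idxOf?]; exact hi
      have hstep : pvStepA (cs, vs) ch = (cs, vs.set i (vs.getD i 0 + 1)) := by
        simp only [pvStepA, PySem.List.index?_eq_idxOf?, hi', List.getD]
      rw [hstep]
      have hlen : cs.length = (vs.set i (vs.getD i 0 + 1)).length := by simpa using h
      obtain ⟨h1, h2, h3⟩ := ih cs (vs.set i (vs.getD i 0 + 1)) hlen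
      have hadd : PySem.Set.add cs ch = cs := by
        simp [PySem.Set.add, PySem.Set.contains, hm]
      refine ⟨by rw [h1]; simp only [PySem.Set.update, List.foldl_cons, hadd], h2, ?_⟩
      rw [pv_sum_set_add_one vs i (h ▸ hilt)] at h3
      simp only [List.length_cons] at h3 ⊢
      push_cast at h3 ⊢
      linarith
    · have hidx : PySem.List.index? cs ch = none := (PySem.List.index?_eq_none_iff cs ch).mpr hm
      have hidx' : List.idxOf? ch cs = none := by
        rw [← PySem.List.index?_eq_idxOf?]; exact hidx
      have hstep : pvStepA (cs, vs) ch = (cs ++ [ch], vs ++ [(ch.toNat : Int)]) := by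
        simp only [pvStepA, PySem.List.index?_eq_idxOf?, hidx']
      rw [hstep]
      have hlen : (cs ++ [ch]).length = (vs ++ [(ch.toNat : Int)]).length := by simp [h]
      obtain ⟨h1, h2, h3⟩ := ih (cs ++ [ch]) (vs ++ [(ch.toNat : Int)]) hlen
      have hadd : PySem.Set.add cs ch = cs ++ [ch] := by
        simp [PySem.Set.add, PySem.Set.contains, hm]
      refine ⟨by rw [h1]; simp only [PySem.Set.update, List.foldl_cons, hadd], h2, ?_⟩
      simp only [List.map_append, List.sum_append, List.map_cons, List.map_nil, List.sum_cons,
        List.sum_nil, List.length_append, List.length_cons, List.length_nil] at h3 ⊢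
      push_cast at h3 ⊢
      linarith

-- ===== VERDICT (by name: the statement is the Claim_ definition above) =====
theorem hash_func_unique_ascii_spec : Claim_equal_hash_func_unique_ascii := by
  intro key _
  unfold Spec_hash_func_unique_ascii hash_func_unique_ascii hash_func_unique_ascii_alt
  obtain ⟨h1, h2, h3⟩ := pv_loopA key.toList [] [] rfl
  rw [PySem.Set.update_nil_left] at h1
  have hsum : ∀ (vs : List Int), vs.foldl (fun value v => value + v) 0 = vs.sum := by
    intro vs
    rw [PySem.List.foldl_add (g := fun v => v)]
    simp
  simp only [hsum]
  rw [h1] at h3 h2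
  have hlen : PySem.Set.len (PySem.Set.ofList key.toList) = ((PySem.Set.ofList key.toList).length : Int) := by
    simp [PySem.Set.len]
  simp only [List.map_nil, List.sum_nil, List.length_nil] at h3
  rw [hlen]
  push_cast at h3 ⊢
  linarith
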